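-- pv_equiv track=rewrite | github.com/Shinokawa/Fast-SCNN-pytorch | onnx_single_image_inference.py | _find_drivable_segments
-- ===== SOURCE A (Python) =====
-- def _find_drivable_segments(row, min_width):
--     """
--     在一行中找到所有可行驶区域的连续段
--
--     参数：
--         row: 图像行数据
--         min_width: 最小宽度
--
--     返回：
--         segments: 连续段列表 [(start, end), ...]
--     """
--     segments = []
--     start = None
--
--     for i, pixel in enumerate(row):
--         if pixel > 0:  # 可行驶区域
--             if start is None:
--                 start = i
--         else:  # 不可行驶区域
--             if start is not None:
--                 if i - start >= min_width:  # 满足最小宽度要求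
--                     segments.append((start, i))
--                 start = None
--
--     # 处理行末尾的情况
--     if start is not None and len(row) - start >= min_width:
--         segments.append((start, len(row)))
--
--     return segments
-- ===== SOURCE B (Python) =====
-- def _find_drivable_segments(row, min_width):
--     segments = []
--     i = 0
--     n = len(row)
--     while i < n:
--         if row[i] > 0:
--             j = i
--             while j < n and row[j] > 0:
--                 j += 1
--             if j - i >= min_width:
--                 segments.append((i, j))
--             i = j
--         else:
--             i += 1
--     return segments
-- ===== Notes on version B (the rewrite author's own statement) =====
-- stated objective: alternative
-- what changed: Replaced the per-pixel state machine (Optional start toggling plus an end-of-row tail clause) by run extraction: B jumps from each run's start to its end with an inner scan, emitting the segment immediately, so no None-state or tail clause exists.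
import Mathlib
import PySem

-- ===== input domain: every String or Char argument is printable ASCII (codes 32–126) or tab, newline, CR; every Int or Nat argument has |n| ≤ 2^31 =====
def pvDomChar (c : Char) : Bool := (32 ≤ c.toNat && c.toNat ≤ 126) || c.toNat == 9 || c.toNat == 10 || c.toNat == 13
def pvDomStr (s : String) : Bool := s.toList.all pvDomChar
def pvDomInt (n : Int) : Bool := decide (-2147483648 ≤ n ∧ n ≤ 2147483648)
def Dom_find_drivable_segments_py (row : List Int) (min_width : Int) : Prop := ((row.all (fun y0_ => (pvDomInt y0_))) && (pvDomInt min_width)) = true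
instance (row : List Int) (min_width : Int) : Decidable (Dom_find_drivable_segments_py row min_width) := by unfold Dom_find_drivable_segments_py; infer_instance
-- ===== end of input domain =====

-- B replaces A's per-pixel Optional-start state machine (with end-of-row tail clause) by
-- direct extraction of maximal positive runs; same O(n) cost ("alternative").

-- ===== PORT A =====
-- A's for-loop over enumerate(row) with state (segments, start), as structural recursion.
def pvAGo (xs : List Int) (i : Int) (mw : Int) (start : Option Int)
    (segs : List (Int × Int)) : List (Int × Int) × Option Int :=
  match xs with
  | [] => (segs, start)
  | pixel :: rest =>
    if pixel > 0 then
      match start with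
      | none => pvAGo rest (i + 1) mw (some i) segs
      | some _ => pvAGo rest (i + 1) mw start segs
    else
      match start with
      | some s => pvAGo rest (i + 1) mw none (if i - s ≥ mw then segs ++ [(s, i)] else segs)
      | none => pvAGo rest (i + 1) mw none segs

def find_drivable_segments_py (row : List Int) (min_width : Int) : List (Int × Int) :=
  let r := pvAGo row 0 min_width none []
  match r.2 with
  | some s => if (row.length : Int) - s ≥ min_width then r.1 ++ [(s, (row.length : Int))] else r.1
  | none => r.1

-- ===== PORT B =====
-- B's outer while-loop: skip non-positive pixels; at a positive pixel scan the whole run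
-- (the inner `while j < n and row[j] > 0` = takeWhile/dropWhile), emit if wide enough.
def pvAltGo (xs : List Int) (i : Int) (mw : Int) : List (Int × Int) :=
  match xs with
  | [] => []
  | x :: rest =>
    if h : x > 0 then
      let k : Int := ((x :: rest).takeWhile (fun p => p > 0)).length
      (if k ≥ mw then [(i, i + k)] else []) ++
        pvAltGo ((x :: rest).dropWhile (fun p => p > 0)) (i + k) mw
    else pvAltGo rest (i + 1) mw
termination_by xs.length
decreasing_by
  · simp [h]
    exact List.length_dropWhile_le _ _
  · simp

def find_drivable_segments_py_alt (row : List Int) (min_width : Int) : List (Int × Int) :=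
  pvAltGo row 0 min_width

-- ===== PRECONDITION & SPEC =====
def Spec_find_drivable_segments_py (row : List Int) (min_width : Int) (out : List (Int × Int)) : Prop := out = find_drivable_segments_py_alt row min_width
instance (row : List Int) (min_width : Int) (out : List (Int × Int)) : Decidable (Spec_find_drivable_segments_py row min_width out) := by unfold Spec_find_drivable_segments_py; infer_instance

-- ===== CLAIM (what is proved, stated in full; the proofs are below) =====
def Claim_equal_find_drivable_segments_py : Prop := ∀ (row : List Int) (min_width : Int), Dom_find_drivable_segments_py row min_width → Spec_find_drivable_segments_py row min_width (find_drivable_segments_py row min_width)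

-- ===== LEMMAS AND PROOFS =====

-- the end-of-row tail clause of A, parameterised by the final index n
def pvPost (n mw : Int) (r : List (Int × Int) × Option Int) : List (Int × Int) :=
  match r.2 with
  | some s => if n - s ≥ mw then r.1 ++ [(s, n)] else r.1
  | none => r.1

theorem pvMain (xs : List Int) : ∀ (i mw : Int) (segs : List (Int × Int)),
    (pvPost (i + xs.length) mw (pvAGo xs i mw none segs) = segs ++ pvAltGo xs i mw) ∧
    (∀ s : Int, pvPost (i + xs.length) mw (pvAGo xs i mw (some s) segs) =
      segs ++ (if (i + ((xs.takeWhile (fun p => p > 0)).length : Int)) - s ≥ mw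
                then [(s, i + ((xs.takeWhile (fun p => p > 0)).length : Int))] else []) ++
        pvAltGo (xs.dropWhile (fun p => p > 0)) (i + ((xs.takeWhile (fun p => p > 0)).length : Int)) mw) := by
  induction xs with
  | nil =>
    intro i mw segs
    constructor
    · simp [pvAGo, pvAltGo, pvPost]
    · intro s
      simp only [pvAGo, pvPost, List.takeWhile_nil, List.dropWhile_nil, List.length_nil,
        Int.natCast_zero, add_zero, pvAltGo]
      split_ifs <;> simp
  | cons x rest ih =>
    intro i mw segs
    have elen : i + ((x :: rest).length : Int) = (i + 1) + (rest.length : Int) := by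
      push_cast [List.length_cons]; ring
    by_cases hx : x > 0
    · -- positive pixel
      set t : Int := ((List.takeWhile (fun p => p > 0) rest).length : Int) with ht
      have etk : ((List.takeWhile (fun p => p > 0) (x :: rest)).length : Int) = 1 + t := by
        rw [ht]; simp [hx]; ring
      have edk : List.dropWhile (fun p => p > 0) (x :: rest)
          = List.dropWhile (fun p => p > 0) rest := by
        simp [hx]
      have ealt : pvAltGo (x :: rest) i mw
          = (if 1 + t ≥ mw then [(i, i + (1 + t))] else [])
              ++ pvAltGo (List.dropWhile (fun p => p > 0) rest) (i + (1 + t)) mw := by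
        rw [pvAltGo]
        simp only [hx, dite_true, etk, edk]
      have c1 : i + (1 + t) = i + 1 + t := by ring
      have c2 : i + 1 + t - i = 1 + t := by ring
      constructor
      · have h2 := (ih (i + 1) mw segs).2 i
        have ha : pvAGo (x :: rest) i mw none segs = pvAGo rest (i + 1) mw (some i) segs := by
          simp [pvAGo, hx]
        rw [elen, ha, h2, ealt, c1, c2, List.append_assoc]
      · intro s
        have h2 := (ih (i + 1) mw segs).2 s
        have ha : pvAGo (x :: rest) i mw (some s) segs = pvAGo rest (i + 1) mw (some s) segs := by
          simp [pvAGo, hx]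
        rw [elen, ha, h2, etk, edk, c1]
    · -- non-positive pixel
      have etk : List.takeWhile (fun p => p > 0) (x :: rest) = ([] : List Int) := by
        simp [hx]
      have edk : List.dropWhile (fun p => p > 0) (x :: rest) = x :: rest := by
        simp [hx]
      have ealt : pvAltGo (x :: rest) i mw = pvAltGo rest (i + 1) mw := by
        rw [pvAltGo]; simp [hx]
      constructor
      · have ha : pvAGo (x :: rest) i mw none segs = pvAGo rest (i + 1) mw none segs := by
          simp [pvAGo, hx]
        rw [elen, ha, (ih (i + 1) mw segs).1, ealt]
      · intro s
        have ha : pvAGo (x :: rest) i mw (some s) segs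
            = pvAGo rest (i + 1) mw none (if i - s ≥ mw then segs ++ [(s, i)] else segs) := by
          simp [pvAGo, hx]
        rw [elen, ha, (ih (i + 1) mw _).1, etk]
        simp only [List.length_nil, Int.natCast_zero, add_zero]
        rw [edk, ealt]
        split_ifs <;> simp

-- ===== VERDICT (by name: the statement is the Claim_ definition above) =====
theorem find_drivable_segments_py_spec : Claim_equal_find_drivable_segments_py := by
  intro row min_width _
  unfold Spec_find_drivable_segments_py
  have h := (pvMain row 0 min_width []).1
  simp only [zero_add, List.nil_append] at h
  have e : find_drivable_segments_py row min_width
      = pvPost (row.length : Int) min_width (pvAGo row 0 min_width none []) := rfl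
  rw [e, h]
  rfl
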